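-- pv_equiv track=rewrite | github.com/cgbriggs99/Atelaxia | repo-scripts/unihex.py | to_hex_size
-- ===== SOURCE A (Python) =====
-- def to_hex_size(number, length) :
--     """
-- Convert a number to a hex string with the given length in bytes.
--
-- Parameters
-- ----------
-- number: The number to convert.
-- length: The length in bytes that you want the number to be.
-- """
--     out = []
--     vals = ['0', '1', '2', '3', '4', '5', '6', '7', '8', '9', 'a', 'b',
--             'c', 'd', 'e', 'f']
--     try :
--         conv = int(number)
--     except ValueError :
--         conv = int(number, 16)
--     for i in range(length * 2) :
--         out.append(vals[conv % 16])
--         conv //= 16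
--     # Need to reverse it.
--     return "".join(reversed(out))
-- ===== SOURCE B (Python) =====
-- def to_hex_size(number, length):
--     """Convert a number to a hex string with the given length in bytes."""
--     try:
--         conv = int(number)
--     except ValueError:
--         conv = int(number, 16)
--     n = length * 2
--     if n <= 0:
--         return ""
--     return format(conv % (16 ** n), '0{}x'.format(n))
-- ===== Notes on version B (the rewrite author's own statement) =====
-- stated objective: faster
-- what changed: Replaces the explicit per-digit extraction loop (append vals[conv%16], conv//=16, then reverse and join) with a single modular reduction conv % 16**(2*length) followed by zero-padded hex formatting via format().
import Mathlib
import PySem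

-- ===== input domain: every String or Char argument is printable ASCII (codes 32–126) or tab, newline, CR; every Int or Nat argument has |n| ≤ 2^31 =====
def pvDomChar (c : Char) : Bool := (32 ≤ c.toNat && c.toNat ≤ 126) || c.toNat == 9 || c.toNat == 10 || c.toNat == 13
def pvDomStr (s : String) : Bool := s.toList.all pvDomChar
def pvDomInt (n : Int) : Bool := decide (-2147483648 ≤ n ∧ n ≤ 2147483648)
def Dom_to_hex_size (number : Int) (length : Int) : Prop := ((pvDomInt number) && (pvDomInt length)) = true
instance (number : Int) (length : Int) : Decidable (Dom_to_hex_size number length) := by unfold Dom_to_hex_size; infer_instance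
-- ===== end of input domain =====

-- B replaces A's digit-extraction loop + reverse-join by one modular reduction and
-- zero-padded hex formatting; same values everywhere (the int() parse is the identity on Int inputs).

-- ===== PORT A =====
-- vals: Python's list of one-character strings, ported as the characters they hold
-- (the final "".join of one-character strings is String.mk of the character list).
def pvHexVals : List Char :=
  ['0', '1', '2', '3', '4', '5', '6', '7', '8', '9', 'a', 'b', 'c', 'd', 'e', 'f']

def to_hex_size (number : Int) (length : Int) : String :=
  -- int(number) on an int is the identity (the except branch is unreachable for Int input)
  let conv : Int := number
  let st :=
    (PySem.List.pyRange 0 (length * 2) 1).foldl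
      (fun (st : List Char × Int) _ =>
        -- out.append(vals[conv % 16]); conv //= 16   (the index is always in 0..15, so pyGetD is exact)
        (st.1 ++ [PySem.List.pyGetD pvHexVals (PySem.Int.mod st.2 16) '?'],
         PySem.Int.floordiv st.2 16))
      (([] : List Char), conv)
  String.mk st.1.reverse

-- ===== PORT B =====
-- format(v, '0{n}x') for 0 ≤ v < 16^n: the n hex digits of v, most significant first.
def pvHexPad : Nat → Nat → List Char
  | _, 0 => []
  | v, k + 1 => pvHexPad (v / 16) k ++ [Nat.digitChar (v % 16)]

def to_hex_size_alt (number : Int) (length : Int) : String :=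
  let conv : Int := number
  let n : Int := length * 2
  if n ≤ 0 then ""
  else String.mk (pvHexPad (PySem.Int.mod conv (16 ^ n.toNat)).toNat n.toNat)

-- ===== PRECONDITION & SPEC =====
def Spec_to_hex_size (number : Int) (length : Int) (out : String) : Prop := out = to_hex_size_alt number length
instance (number : Int) (length : Int) (out : String) : Decidable (Spec_to_hex_size number length out) := by unfold Spec_to_hex_size; infer_instance

-- ===== CLAIM (what is proved, stated in full; the proofs are below) =====
def Claim_equal_to_hex_size : Prop := ∀ (number : Int) (length : Int), Dom_to_hex_size number length → Spec_to_hex_size number length (to_hex_size number length)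

-- ===== LEMMAS AND PROOFS =====

-- A's loop body (the range index is ignored).
def pvStep (st : List Char × Int) : List Char × Int :=
  (st.1 ++ [PySem.List.pyGetD pvHexVals (PySem.Int.mod st.2 16) '?'],
   PySem.Int.floordiv st.2 16)

-- A's loop ignores the element, so the fold is an iterate of the body.
lemma pvFoldl_const (l : List Int) (s : List Char × Int) :
    l.foldl (fun st _ => pvStep st) s = pvStep^[l.length] s := by
  induction l generalizing s with
  | nil => rfl
  | cons a t ih => simp [List.foldl_cons, ih, Function.iterate_succ_apply]

-- The digits A's loop produces, least significant first.
def pvDigitsLSB : Nat → Int → List Char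
  | 0, _ => []
  | k + 1, c =>
      PySem.List.pyGetD pvHexVals (PySem.Int.mod c 16) '?' ::
        pvDigitsLSB k (PySem.Int.floordiv c 16)

lemma pvIterate_eq (k : Nat) (acc : List Char) (c : Int) :
    pvStep^[k] (acc, c) =
      (acc ++ pvDigitsLSB k c, (fun x => PySem.Int.floordiv x 16)^[k] c) := by
  induction k generalizing acc c with
  | zero => simp [pvDigitsLSB]
  | succ k ih =>
      rw [Function.iterate_succ_apply, Function.iterate_succ_apply]
      simp [pvStep, ih, pvDigitsLSB]

lemma pvHexVals_lookup (r : Int) (h0 : 0 ≤ r) (h16 : r < 16) :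
    PySem.List.pyGetD pvHexVals r '?' = Nat.digitChar r.toNat := by
  obtain ⟨m, rfl⟩ := Int.eq_ofNat_of_zero_le h0
  have hm : m < 16 := by exact_mod_cast h16
  have : ∀ m : Nat, m < 16 →
      PySem.List.pyGetD pvHexVals (m : Int) '?' = Nat.digitChar m := by decide
  simpa using this m hm

lemma pvMod_pow_succ_mod (c : Int) (k : Nat) :
    (c % (16 ^ (k + 1))).toNat % 16 = (c % 16).toNat := by
  have hp : (0 : Int) < 16 ^ (k + 1) := by positivity
  have h1 : 0 ≤ c % (16 ^ (k + 1)) := Int.emod_nonneg c (by omega)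
  have h3 : c % (16 ^ (k + 1)) % 16 = c % 16 :=
    Int.emod_emod_of_dvd c ⟨16 ^ k, by ring⟩
  omega

lemma pvMod_pow_succ_div (c : Int) (k : Nat) :
    (c % (16 ^ (k + 1))).toNat / 16 = ((c / 16) % (16 ^ k)).toNat := by
  have hp : (0 : Int) < 16 ^ k := by positivity
  set p : Int := 16 ^ k with hpdef
  have hps : (16 : Int) ^ (k + 1) = 16 * p := by rw [hpdef]; ring
  set M : Int := c % (16 ^ (k + 1)) with hM
  have h1 : 0 ≤ M := Int.emod_nonneg c (by positivity)
  have h2 : M < 16 * p := by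
    rw [hM, hps] at *
    exact Int.emod_lt_of_pos c (by positivity)
  have hc : 16 * p * (c / (16 * p)) + M = c := by
    rw [hM, hps]; exact Int.ediv_add_emod c (16 * p)
  have hdiv : c / 16 = p * (c / (16 * p)) + M / 16 := by
    conv_lhs => rw [← hc]
    rw [show 16 * p * (c / (16 * p)) + M = M + (p * (c / (16 * p))) * 16 by ring]
    rw [Int.add_mul_ediv_right _ _ (by norm_num : (16:Int) ≠ 0)]
    ring
  have hmod : (c / 16) % p = M / 16 := by
    rw [hdiv, add_comm, Int.add_mul_emod_self_left]
    exact Int.emod_eq_of_lt (by omega) (by omega)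
  rw [hmod]
  omega

lemma pvDigits_reverse (k : Nat) (c : Int) :
    (pvDigitsLSB k c).reverse = pvHexPad (c % (16 ^ k)).toNat k := by
  induction k generalizing c with
  | zero => simp [pvDigitsLSB, pvHexPad]
  | succ k ih =>
      have h16 : (0 : Int) < 16 := by norm_num
      have hmod : PySem.Int.mod c 16 = c % 16 := PySem.Int.mod_eq_emod_of_pos h16
      have hdiv : PySem.Int.floordiv c 16 = c / 16 :=
        PySem.Int.floordiv_eq_ediv_of_pos h16
      simp only [pvDigitsLSB, pvHexPad, List.reverse_cons, ih, hmod, hdiv]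
      rw [pvMod_pow_succ_div c k, pvMod_pow_succ_mod c k,
        pvHexVals_lookup (c % 16) (Int.emod_nonneg c (by omega))
          (Int.emod_lt_of_pos c h16)]

-- ===== VERDICT (by name: the statement is the Claim_ definition above) =====
theorem to_hex_size_spec : Claim_equal_to_hex_size := by
  intro number length _
  unfold Spec_to_hex_size to_hex_size to_hex_size_alt
  by_cases h : length * 2 ≤ 0
  · have hr : PySem.List.pyRange 0 (length * 2) 1 = [] := by
      simp [PySem.List.pyRange]; omega
    simp [hr, h]
    rfl
  · push Not at h
    have hfold :
        (PySem.List.pyRange 0 (length * 2) 1).foldl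
            (fun (st : List Char × Int) _ => pvStep st) (([] : List Char), number)
          = pvStep^[(length * 2).toNat] (([] : List Char), number) := by
      rw [pvFoldl_const]
      congr 1
      rw [show length * 2 = (((length * 2).toNat : Nat) : Int) by omega,
        PySem.List.pyRange_zero_natCast, List.length_map, List.length_range]
      omega
    simp only [pvStep] at hfold
    simp only [hfold, pvIterate_eq, List.nil_append,
      if_neg (show ¬ length * 2 ≤ 0 by omega)]
    rw [pvDigits_reverse, PySem.Int.mod_eq_emod_of_pos (by positivity)]
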